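-- pv_equiv track=rewrite | github.com/mat-daemon/ai-projects | game_algorithms/validator.py | check_game_board
-- ===== SOURCE A (Python) =====
-- def check_game_board(game_init):
--     # Validate Reversi (Otello) game rules
--     rows_valid_nr = 8
--     columns_valid_nr = 8
--
--
--     # Game board must be 8x8 plate
--     if(len(game_init)) != rows_valid_nr:
--         return (False, f"Number of rows is not equal {rows_valid_nr}")
--
--     for row in game_init:
--         if len(row) != columns_valid_nr:
--             return (False, f"Number of coumns is not equal {columns_valid_nr}")
--
--
--     # valid states are:
--     # 0 - for empty field
--     # 1 - for player `1`
--     # 2 - for player `2`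
--     states_nr = 0
--     for row in game_init:
--         for state in row:
--             if state == 1:
--                 states_nr += 1
--             elif state == 2:
--                 states_nr -= 1
--             elif state != 0:
--                 return (False, "Inappropriate state")
--
--
--     # Number of states with value 1 must be equal number of stater with value 2
--     if states_nr != 0:
--         return (False, "Number of states are not equal")
--
--     return (True, "")
-- ===== SOURCE B (Python) =====
-- def check_game_board(game_init):
--     # Validate Reversi (Othello) board: dimensions, then a frequency table of cell states.
--     if len(game_init) != 8:
--         return (False, "Number of rows is not equal 8")
--     if any(len(row) != 8 for row in game_init):
--         return (False, "Number of coumns is not equal 8")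
--     counts = {}
--     for row in game_init:
--         for state in row:
--             counts[state] = counts.get(state, 0) + 1
--     if set(counts) - {0, 1, 2}:
--         return (False, "Inappropriate state")
--     if counts.get(1, 0) != counts.get(2, 0):
--         return (False, "Number of states are not equal")
--     return (True, "")
-- ===== Notes on version B (the rewrite author's own statement) =====
-- stated objective: idiomatic
-- what changed: Replaces the signed running accumulator with per-cell +1/-1/early-return branches by a one-pass frequency table: invalid states are detected by set difference on the table's keys and balance by comparing the counts of 1 and 2.
import Mathlib
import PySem

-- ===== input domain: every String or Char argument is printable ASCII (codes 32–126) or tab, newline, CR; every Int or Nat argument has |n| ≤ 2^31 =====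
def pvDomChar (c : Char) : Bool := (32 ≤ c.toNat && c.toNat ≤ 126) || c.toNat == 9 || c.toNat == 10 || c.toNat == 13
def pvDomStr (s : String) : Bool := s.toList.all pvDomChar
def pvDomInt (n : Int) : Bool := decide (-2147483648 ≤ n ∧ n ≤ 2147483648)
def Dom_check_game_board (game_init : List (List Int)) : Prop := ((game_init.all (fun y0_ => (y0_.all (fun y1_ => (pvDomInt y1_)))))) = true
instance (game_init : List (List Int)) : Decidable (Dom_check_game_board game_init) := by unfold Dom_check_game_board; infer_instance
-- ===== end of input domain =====

-- B replaces A's signed running accumulator with a one-pass frequency table (dict counter),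
-- checked afterwards for invalid keys and for count(1) = count(2): same values, more idiomatic.


-- ===== PORT A =====
-- 'for row in game_init: if len(row) != 8: return …' (early return)
def aColLoop : List (List Int) → Option (Bool × String)
  | [] => none
  | row :: rest =>
    if row.length ≠ 8 then some (false, "Number of coumns is not equal 8")
    else aColLoop rest

-- inner 'for state in row' with the running accumulator states_nr (inl) or early return (inr)
def aCellLoop : List Int → Int → Sum Int (Bool × String)
  | [], n => .inl n
  | s :: rest, n =>
    if s = 1 then aCellLoop rest (n + 1)
    else if s = 2 then aCellLoop rest (n - 1)
    else if s ≠ 0 then .inr (false, "Inappropriate state")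
    else aCellLoop rest n

-- outer 'for row in game_init'
def aRowLoop : List (List Int) → Int → Sum Int (Bool × String)
  | [], n => .inl n
  | row :: rest, n =>
    match aCellLoop row n with
    | .inl n' => aRowLoop rest n'
    | .inr r => .inr r

def check_game_board (game_init : List (List Int)) : Bool × String :=
  if game_init.length ≠ 8 then (false, "Number of rows is not equal 8")
  else
    match aColLoop game_init with
    | some r => r
    | none =>
      match aRowLoop game_init 0 with
      | .inr r => r
      | .inl n => if n ≠ 0 then (false, "Number of states are not equal") else (true, "")

-- ===== PORT B =====
def check_game_board_alt (game_init : List (List Int)) : Bool × String :=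
  if game_init.length ≠ 8 then (false, "Number of rows is not equal 8")
  else if game_init.any (fun row => row.length ≠ 8) then (false, "Number of coumns is not equal 8")
  else
    -- counts[state] = counts.get(state, 0) + 1 over all cells
    let counts := (game_init.flatMap id).foldl
      (fun d s => d.insert s (d.getD s 0 + 1)) (PySem.Dict.empty : PySem.Dict Int Int)
    -- set(counts) - {0, 1, 2}
    if counts.keys.filter (fun k => ¬(k = 0 ∨ k = 1 ∨ k = 2)) ≠ [] then
      (false, "Inappropriate state")
    else if counts.getD 1 0 ≠ counts.getD 2 0 then (false, "Number of states are not equal")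
    else (true, "")

-- ===== PRECONDITION & SPEC =====
def Spec_check_game_board (game_init : List (List Int)) (out : Bool × String) : Prop := out = check_game_board_alt game_init
instance (game_init : List (List Int)) (out : Bool × String) : Decidable (Spec_check_game_board game_init out) := by unfold Spec_check_game_board; infer_instance

-- ===== CLAIM (what is proved, stated in full; the proofs are below) =====
def Claim_equal_check_game_board : Prop := ∀ (game_init : List (List Int)), Dom_check_game_board game_init → Spec_check_game_board game_init (check_game_board game_init)

-- ===== LEMMAS AND PROOFS =====

theorem aColLoop_eq (g : List (List Int)) :
    aColLoop g = if g.any (fun row => row.length ≠ 8) then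
      some (false, "Number of coumns is not equal 8") else none := by
  induction g with
  | nil => simp [aColLoop]
  | cons row rest ih =>
    by_cases h : row.length = 8 <;> simp [aColLoop, h, ih]

theorem aCellLoop_append (xs ys : List Int) (n : Int) :
    aCellLoop (xs ++ ys) n =
      match aCellLoop xs n with
      | .inl n' => aCellLoop ys n'
      | .inr r => .inr r := by
  induction xs generalizing n with
  | nil => simp [aCellLoop]
  | cons s rest ih =>
    by_cases h1 : s = 1
    · simp [aCellLoop, h1, ih]
    · by_cases h2 : s = 2
      · simp [aCellLoop, h2, ih]
      · by_cases h0 : s = 0 <;> simp [aCellLoop, h1, h2, h0, ih]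

theorem aRowLoop_eq_flatten (g : List (List Int)) (n : Int) :
    aRowLoop g n = aCellLoop (g.flatMap id) n := by
  induction g generalizing n with
  | nil => simp [aRowLoop, aCellLoop]
  | cons row rest ih =>
    simp only [List.flatMap_cons, id, aCellLoop_append, aRowLoop]
    cases aCellLoop row n with
    | inl n' => simp [ih]
    | inr r => simp

-- characterisation of A's accumulator scan on a flat cell list
theorem aCellLoop_char (cells : List Int) (n : Int) :
    aCellLoop cells n =
      if cells.all (fun s => s = 0 ∨ s = 1 ∨ s = 2) then
        .inl (n + (cells.count 1 : Int) - (cells.count 2 : Int))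
      else .inr (false, "Inappropriate state") := by
  induction cells generalizing n with
  | nil => simp [aCellLoop]
  | cons s rest ih =>
    by_cases h1 : s = 1
    · subst h1
      rw [show aCellLoop (1 :: rest) n = aCellLoop rest (n + 1) from by simp [aCellLoop], ih,
        show ((1 : Int) :: rest).all (fun s => s = 0 ∨ s = 1 ∨ s = 2)
           = rest.all (fun s => s = 0 ∨ s = 1 ∨ s = 2) from by simp]
      split_ifs with h
      · congr 1
        simp only [List.count_cons]
        norm_num
        ring
      · rfl
    · by_cases h2 : s = 2
      · subst h2
        rw [show aCellLoop (2 :: rest) n = aCellLoop rest (n - 1) from by simp [aCellLoop], ih,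
          show ((2 : Int) :: rest).all (fun s => s = 0 ∨ s = 1 ∨ s = 2)
             = rest.all (fun s => s = 0 ∨ s = 1 ∨ s = 2) from by simp]
        split_ifs with h
        · congr 1
          simp only [List.count_cons]
          norm_num
          ring
        · rfl
      · by_cases h0 : s = 0
        · subst h0
          rw [show aCellLoop (0 :: rest) n = aCellLoop rest n from by simp [aCellLoop], ih,
            show ((0 : Int) :: rest).all (fun s => s = 0 ∨ s = 1 ∨ s = 2)
               = rest.all (fun s => s = 0 ∨ s = 1 ∨ s = 2) from by simp]
          split_ifs with h
          · congr 1
          · rfl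
        · simp [aCellLoop, h0, h1, h2]

-- ===== VERDICT (by name: the statement is the Claim_ definition above) =====
theorem check_game_board_spec : Claim_equal_check_game_board := by
  intro g _
  unfold Spec_check_game_board check_game_board check_game_board_alt
  by_cases hlen : g.length = 8
  · rw [if_neg (by simp [hlen]), if_neg (by simp [hlen]), aColLoop_eq]
    by_cases hcols : g.any (fun row => row.length ≠ 8)
    · rw [if_pos hcols, if_pos hcols]
    · rw [if_neg hcols, if_neg hcols]
      simp only [aRowLoop_eq_flatten, aCellLoop_char,
        PySem.Dict.foldl_insert_getD_add_one_eq_counter, PySem.Dict.getD_counter,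
        PySem.Dict.keys_counter]
      set cells := g.flatMap id with hc
      by_cases hall : cells.all (fun s => s = 0 ∨ s = 1 ∨ s = 2)
      · rw [if_pos hall]
        have hfilt : (PySem.Set.ofList cells).filter (fun k => ¬(k = 0 ∨ k = 1 ∨ k = 2)) = [] := by
          rw [List.filter_eq_nil_iff]
          intro k hk
          have h3 := List.all_eq_true.mp hall k ((PySem.Set.mem_ofList cells k).mp hk)
          simp only [decide_eq_true_eq] at h3
          simp
          tauto
        rw [if_neg (fun h => h hfilt)]
        have hred : (match (Sum.inl (0 + (cells.count 1 : Int) - (cells.count 2 : Int)) : Sum Int (Bool × String)) with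
              | .inr r => r
              | .inl n => if n ≠ 0 then (false, "Number of states are not equal") else (true, ""))
            = if (0 + (cells.count 1 : Int) - (cells.count 2 : Int) ≠ 0) then
                (false, "Number of states are not equal") else (true, "") := rfl
        rw [hred]
        by_cases hbal : (cells.count 1 : Int) = (cells.count 2 : Int)
        · rw [if_neg (by omega), if_neg (fun h => h hbal)]
        · rw [if_pos (by omega), if_pos hbal]
      · rw [if_neg hall]
        have hfilt : (PySem.Set.ofList cells).filter (fun k => ¬(k = 0 ∨ k = 1 ∨ k = 2)) ≠ [] := by
          rw [List.all_eq_true] at hall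
          push Not at hall
          obtain ⟨k, hk, hkbad⟩ := hall
          intro hnil
          have hmem : k ∈ PySem.Set.ofList cells := (PySem.Set.mem_ofList cells k).mpr hk
          have hin : k ∈ (PySem.Set.ofList cells).filter (fun k => ¬(k = 0 ∨ k = 1 ∨ k = 2)) := by
            rw [List.mem_filter]
            exact ⟨hmem, by simpa using hkbad⟩
          rw [hnil] at hin
          exact absurd hin (List.not_mem_nil)
        rw [if_pos hfilt]
  · rw [if_pos (by simp [hlen]), if_pos (by simp [hlen])]
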